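-- pv_equiv track=rewrite | github.com/latikamehra/PythonProjects | CommonCodingProblems/MaximumMinimumMatrixPathOnlyRightDown.py | findPossPaths
-- ===== SOURCE A (Python) =====
-- def findPossPaths(grid, start, path=[]) :
--     possPaths = []
--     newPath = path.copy()
--     newPath.append(start)
--
--     maxRow = len(grid) - 1
--     maxCol = len(grid[0]) - 1
--
--     if start[0] == maxRow and start[1] == maxCol: # End point reached
--         return [newPath]
--
--     elif start[0] > maxRow or start[1] > maxCol :
--         return None
--
--     else :
--
--         rightMove = (start[0], start[1]+1)
--         downMove = (start[0]+1, start[1])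
--
--         possRightPaths = findPossPaths(grid, rightMove, newPath)
--         possDownPaths = findPossPaths(grid, downMove, newPath)
--
--         if possRightPaths!=None : possPaths += possRightPaths
--         if possDownPaths!=None : possPaths += possDownPaths
--
--         return possPaths
-- ===== SOURCE B (Python) =====
-- def findPossPaths(grid, start, path=[]):
--     maxRow = len(grid) - 1
--     maxCol = len(grid[0]) - 1
--     if start[0] > maxRow or start[1] > maxCol:
--         return None
--     results = []
--     stack = [(start, path)]
--     while stack:
--         (r, c), p = stack.pop()
--         np = p + [(r, c)]
--         if r == maxRow and c == maxCol:
--             results.append(np)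
--         elif r <= maxRow and c <= maxCol:
--             stack.append(((r + 1, c), np))
--             stack.append(((r, c + 1), np))
--     return results
-- ===== Notes on version B (the rewrite author's own statement) =====
-- stated objective: alternative
-- what changed: A's recursive right-then-down DFS is replaced by an iterative loop over an explicit stack of (cell, path) frames with a results accumulator, emitting the same paths in the same order without recursion.
-- outside the precondition, e.g. on findPossPaths([], (0, 0), []): A raises IndexError, B raises IndexError; on findPossPaths([[1, 2], [3, 4]], (2, 0), []): A returns None, B returns None
import Mathlib
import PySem

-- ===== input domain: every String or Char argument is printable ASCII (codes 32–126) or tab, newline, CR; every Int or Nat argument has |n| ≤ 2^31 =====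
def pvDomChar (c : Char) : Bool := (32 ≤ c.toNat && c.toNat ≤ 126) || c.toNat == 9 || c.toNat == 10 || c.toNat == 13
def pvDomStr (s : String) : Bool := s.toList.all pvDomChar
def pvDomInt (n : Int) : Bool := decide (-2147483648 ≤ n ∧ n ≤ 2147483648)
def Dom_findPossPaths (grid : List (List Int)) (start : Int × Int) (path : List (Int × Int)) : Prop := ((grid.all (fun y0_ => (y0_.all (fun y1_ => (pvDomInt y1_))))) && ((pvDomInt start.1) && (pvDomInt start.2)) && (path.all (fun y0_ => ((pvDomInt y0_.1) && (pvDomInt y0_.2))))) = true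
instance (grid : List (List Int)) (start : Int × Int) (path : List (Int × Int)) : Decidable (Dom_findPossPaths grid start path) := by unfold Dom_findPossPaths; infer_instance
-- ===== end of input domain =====

-- B replaces A's recursion by an iterative explicit-stack DFS with an accumulator (objective: alternative; same output, same order).

-- ===== PORT A =====
-- A's recursion, returning Option: 'none' is Python's None (returned when start is past the grid).
-- The recursion is guarded by fuel (a totality guard only): the wrapper supplies the exact remaining
-- Manhattan distance, and the fuel-0 branch is unreachable on every in-range call.
def findPossPathsAuxF (grid : List (List Int)) (fuel : Nat) (start : Int × Int) (path : List (Int × Int)) : Option (List (List (Int × Int))) :=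
  let newPath := path ++ [start]                              -- newPath = path.copy(); newPath.append(start)
  let maxRow : Int := (grid.length : Int) - 1
  let maxCol : Int := ((grid.head?.getD []).length : Int) - 1 -- grid[0]; Pre_ excludes grid = [] (IndexError)
  if start.1 = maxRow ∧ start.2 = maxCol then
    some [newPath]
  else if start.1 > maxRow ∨ start.2 > maxCol then
    none
  else
    match fuel with
    | 0 => none  -- unreachable for the wrapper's fuel
    | fuel + 1 =>
      let rightMove := (start.1, start.2 + 1)
      let downMove := (start.1 + 1, start.2)
      let possRightPaths := findPossPathsAuxF grid fuel rightMove newPath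
      let possDownPaths := findPossPathsAuxF grid fuel downMove newPath
      -- possPaths = [] ; if != None : possPaths += …
      some (([] ++ possRightPaths.getD []) ++ possDownPaths.getD [])

-- A returns a list exactly on Pre_; outside (Python returns None or raises) the wrapper's [] is unclaimed.
def findPossPaths (grid : List (List Int)) (start : Int × Int) (path : List (Int × Int)) : List (List (Int × Int)) :=
  (findPossPathsAuxF grid
    (((((grid.length : Int) - 1) - start.1) + ((((grid.head?.getD []).length : Int) - 1) - start.2)).toNat)
    start path).getD []

-- ===== PORT B =====
-- the 'while stack:' loop of Source B; head of the list is the top of the stack.  Fuel is a totality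
-- guard only: each iteration strictly decreases the sum of 3^(remaining distance) over the stack,
-- so the wrapper's fuel (that sum for the initial one-frame stack) is never exhausted.
def fppLoopF (maxRow maxCol : Int) (fuel : Nat) (stack : List ((Int × Int) × List (Int × Int)))
    (results : List (List (Int × Int))) : List (List (Int × Int)) :=
  match stack with
  | [] => results
  | ((r, c), p) :: rest =>
    match fuel with
    | 0 => results  -- unreachable for the wrapper's fuel
    | fuel + 1 =>
      let np := p ++ [(r, c)]
      if r = maxRow ∧ c = maxCol then
        fppLoopF maxRow maxCol fuel rest (results ++ [np])
      else if r ≤ maxRow ∧ c ≤ maxCol then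
        fppLoopF maxRow maxCol fuel (((r, c + 1), np) :: ((r + 1, c), np) :: rest) results
      else
        fppLoopF maxRow maxCol fuel rest results

def findPossPaths_alt (grid : List (List Int)) (start : Int × Int) (path : List (Int × Int)) : List (List (Int × Int)) :=
  let maxRow : Int := (grid.length : Int) - 1
  let maxCol : Int := ((grid.head?.getD []).length : Int) - 1
  if start.1 > maxRow ∨ start.2 > maxCol then []       -- Source B returns None here; outside Pre_
  else fppLoopF maxRow maxCol (3 ^ ((maxRow - start.1) + (maxCol - start.2)).toNat) [(start, path)] []

-- ===== PRECONDITION & SPEC =====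
-- Pre_ excludes only inputs where A yields no list value: grid = [] (both raise IndexError) and
-- starts past the last row or column (A returns None, not a list of the declared type).
def Pre_findPossPaths (grid : List (List Int)) (start : Int × Int) (path : List (Int × Int)) : Prop :=
  grid ≠ [] ∧ start.1 < (grid.length : Int) ∧ start.2 < ((grid.head?.getD []).length : Int)
instance (grid : List (List Int)) (start : Int × Int) (path : List (Int × Int)) : Decidable (Pre_findPossPaths grid start path) := by unfold Pre_findPossPaths; infer_instance

def pvWitness_findPossPaths : List (List Int) × (Int × Int) × (List (Int × Int)) := ([[1, 2], [3, 4]], (0, 0), [])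

def Spec_findPossPaths (grid : List (List Int)) (start : Int × Int) (path : List (Int × Int)) (out : List (List (Int × Int))) : Prop := out = findPossPaths_alt grid start path
instance (grid : List (List Int)) (start : Int × Int) (path : List (Int × Int)) (out : List (List (Int × Int))) : Decidable (Spec_findPossPaths grid start path out) := by unfold Spec_findPossPaths; infer_instance

-- ===== CLAIM (what is proved, stated in full; the proofs are below) =====
def Claim_equal_findPossPaths : Prop := ∀ (grid : List (List Int)) (start : Int × Int) (path : List (Int × Int)), Dom_findPossPaths grid start path → Pre_findPossPaths grid start path → Spec_findPossPaths grid start path (findPossPaths grid start path)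

-- ===== LEMMAS AND PROOFS =====

-- abbreviation used in the proofs: the remaining Manhattan distance of a cell, as a Nat
def fppDist (grid : List (List Int)) (r c : Int) : Nat :=
  ((((grid.length : Int) - 1) - r) + ((((grid.head?.getD []).length : Int) - 1) - c)).toNat

lemma fppAuxF_corner (grid : List (List Int)) (fuel : Nat) (r c : Int) (p : List (Int × Int))
    (h1 : r = (grid.length : Int) - 1) (h2 : c = ((grid.head?.getD []).length : Int) - 1) :
    findPossPathsAuxF grid fuel (r, c) p = some [p ++ [(r, c)]] := by
  rw [findPossPathsAuxF.eq_def]; simp [h1, h2]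

lemma fppAuxF_out (grid : List (List Int)) (fuel : Nat) (r c : Int) (p : List (Int × Int))
    (h : r > (grid.length : Int) - 1 ∨ c > ((grid.head?.getD []).length : Int) - 1) :
    findPossPathsAuxF grid fuel (r, c) p = none := by
  have hc : ¬(r = (grid.length : Int) - 1 ∧ c = ((grid.head?.getD []).length : Int) - 1) := by omega
  rw [findPossPathsAuxF.eq_def]; simp [hc]
  intro h1 h2; omega

lemma fppAuxF_step (grid : List (List Int)) (fuel : Nat) (r c : Int) (p : List (Int × Int))
    (h1 : ¬(r = (grid.length : Int) - 1 ∧ c = ((grid.head?.getD []).length : Int) - 1))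
    (h2 : r ≤ (grid.length : Int) - 1 ∧ c ≤ ((grid.head?.getD []).length : Int) - 1) :
    findPossPathsAuxF grid (fuel + 1) (r, c) p =
      some ((findPossPathsAuxF grid fuel (r, c + 1) (p ++ [(r, c)])).getD []
            ++ (findPossPathsAuxF grid fuel (r + 1, c) (p ++ [(r, c)])).getD []) := by
  have hno : ¬(r > (grid.length : Int) - 1 ∨ c > ((grid.head?.getD []).length : Int) - 1) := by omega
  rw [findPossPathsAuxF.eq_def]; simp [h1]; omega

-- The stack loop emits, in order, the paths A's recursion returns for each pending frame,
-- provided the fuel dominates the sum of 3^distance over the stack.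
lemma fppLoopF_eq (grid : List (List Int)) :
    ∀ (fuel : Nat) (stack : List ((Int × Int) × List (Int × Int))) (results : List (List (Int × Int))),
    (stack.map (fun f => 3 ^ fppDist grid f.1.1 f.1.2)).sum ≤ fuel →
    fppLoopF ((grid.length : Int) - 1) (((grid.head?.getD []).length : Int) - 1) fuel stack results
      = results ++ stack.flatMap (fun f => (findPossPathsAuxF grid (fppDist grid f.1.1 f.1.2) f.1 f.2).getD []) := by
  intro fuel
  induction fuel with
  | zero =>
    intro stack results hsum
    cases stack with
    | nil => simp [fppLoopF]
    | cons hd rest =>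
      exfalso
      simp only [List.map_cons, List.sum_cons] at hsum
      have := Nat.pow_pos (n := fppDist grid hd.1.1 hd.1.2) (show 0 < 3 by norm_num)
      omega
  | succ fuel ih =>
    intro stack results hsum
    cases stack with
    | nil => simp [fppLoopF]
    | cons hd rest =>
      obtain ⟨⟨r, c⟩, p⟩ := hd
      simp only [List.map_cons, List.sum_cons] at hsum
      rw [fppLoopF]
      by_cases hcr : r = (grid.length : Int) - 1 ∧ c = ((grid.head?.getD []).length : Int) - 1
      · simp only [if_pos hcr]
        rw [ih rest (results ++ [p ++ [(r, c)]]) (by have := Nat.pow_pos (n := fppDist grid r c) (show 0 < 3 by norm_num); omega)]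
        simp [fppAuxF_corner grid _ r c p hcr.1 hcr.2]
      · by_cases hin : r ≤ (grid.length : Int) - 1 ∧ c ≤ ((grid.head?.getD []).length : Int) - 1
        · simp only [if_neg hcr, if_pos hin]
          -- the head's distance is positive; both pushed frames have distance one less
          have hk1 : 1 ≤ fppDist grid r c := by unfold fppDist; omega
          have hdr : fppDist grid r (c + 1) = fppDist grid r c - 1 := by unfold fppDist; omega
          have hdd : fppDist grid (r + 1) c = fppDist grid r c - 1 := by unfold fppDist; omega
          have hpow : 3 ^ (fppDist grid r c - 1) + 3 ^ (fppDist grid r c - 1) < 3 ^ fppDist grid r c := by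
            have h3 : 3 ^ fppDist grid r c = 3 ^ (fppDist grid r c - 1) * 3 := by
              rw [← pow_succ, Nat.sub_add_cancel hk1]
            have hp := Nat.pow_pos (n := fppDist grid r c - 1) (show 0 < 3 by norm_num)
            omega
          rw [ih _ results (by simp only [List.map_cons, List.sum_cons]; rw [hdr, hdd]; omega)]
          -- A's recursion at the head, unfolded one step with matching fuel
          have hunf : findPossPathsAuxF grid (fppDist grid r c) (r, c) p =
              some ((findPossPathsAuxF grid (fppDist grid r c - 1) (r, c + 1) (p ++ [(r, c)])).getD []
                ++ (findPossPathsAuxF grid (fppDist grid r c - 1) (r + 1, c) (p ++ [(r, c)])).getD []) := by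
            rw [show fppDist grid r c = (fppDist grid r c - 1) + 1 by omega]
            exact fppAuxF_step grid _ r c p hcr hin
          simp only [List.flatMap_cons, hunf, hdr, hdd]
          simp [List.append_assoc]
        · simp only [if_neg hcr, if_neg hin]
          rw [ih rest results (by have := Nat.pow_pos (n := fppDist grid r c) (show 0 < 3 by norm_num); omega)]
          have hor : r > (grid.length : Int) - 1 ∨ c > ((grid.head?.getD []).length : Int) - 1 := by omega
          simp [fppAuxF_out grid _ r c p hor]

-- ===== VERDICT (by name: the statement is the Claim_ definition above) =====
theorem findPossPaths_spec : Claim_equal_findPossPaths := by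
  intro grid start path _ hpre
  obtain ⟨-, hr, hcnd⟩ := hpre
  unfold Spec_findPossPaths findPossPaths findPossPaths_alt
  have hno : ¬(start.1 > (grid.length : Int) - 1 ∨ start.2 > ((grid.head?.getD []).length : Int) - 1) := by omega
  simp only [if_neg hno]
  rw [fppLoopF_eq grid _ [(start, path)] [] (by simp [fppDist])]
  simp [fppDist]
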